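-- pv_equiv track=rewrite | github.com/AndrewMarinf/OOP | alg.py | func
-- ===== SOURCE A (Python) =====
-- def func(list_dist):
--     salesbymonth = {}
--     for i in list_dist:
--         month = i['month']
--         sales = i['sales']
--         if month in salesbymonth:
--             salesbymonth[month] +=  sales # это для следующих значений
--         else:
--             salesbymonth[month] = sales # это для первых значений
--
--     return salesbymonth
-- ===== SOURCE B (Python) =====
-- def func(list_dist):
--     months = []
--     for i in list_dist:
--         m = i['month']
--         if m not in months:
--             months.append(m)
--     return {m: sum(i['sales'] for i in list_dist if i['month'] == m) for m in months}
-- ===== Notes on version B (the rewrite author's own statement) =====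
-- stated objective: alternative
-- what changed: B first collects the distinct months in order of first appearance, then computes each month's total by an independent filtered-sum scan over the whole input, instead of A's single pass maintaining a running-total dict with an in/else branch.
import Mathlib
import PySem

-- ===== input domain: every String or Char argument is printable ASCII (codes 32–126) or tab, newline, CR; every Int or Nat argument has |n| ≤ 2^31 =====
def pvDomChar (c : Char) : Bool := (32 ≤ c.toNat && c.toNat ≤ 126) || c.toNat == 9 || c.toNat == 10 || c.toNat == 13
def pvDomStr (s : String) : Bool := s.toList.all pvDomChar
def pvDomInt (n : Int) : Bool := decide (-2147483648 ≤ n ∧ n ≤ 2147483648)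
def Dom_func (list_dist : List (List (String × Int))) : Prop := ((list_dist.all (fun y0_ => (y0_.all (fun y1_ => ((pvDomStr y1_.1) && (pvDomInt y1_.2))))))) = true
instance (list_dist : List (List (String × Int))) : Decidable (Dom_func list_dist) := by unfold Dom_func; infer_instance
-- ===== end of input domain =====

-- B replaces A's single running-total-dict pass by two phases: collect the distinct months in
-- first-appearance order, then total each month by an independent filtered-sum scan of the input.

-- ===== PORT A =====
-- the loop: for each record read i['month'], i['sales'] (none = KeyError, excluded by Pre_),
-- then += into or first-insert into the accumulator dict
def funcLoop : List (List (String × Int)) → PySem.Dict Int Int → Option (PySem.Dict Int Int)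
  | [], d => some d
  | i :: rest, d =>
    match (PySem.Dict.mk i).get? "month", (PySem.Dict.mk i).get? "sales" with
    | some month, some sales =>
        funcLoop rest (if d.contains month then d.insert month (d.getD month 0 + sales)
                       else d.insert month sales)
    | _, _ => none

def func (list_dist : List (List (String × Int))) : List (Int × Int) :=
  ((funcLoop list_dist PySem.Dict.empty).getD PySem.Dict.empty).items

-- ===== PORT B =====
-- first loop: months.append(i['month']) unless already seen
def altMonthsLoop : List (List (String × Int)) → List Int → Option (List Int)
  | [], months => some months
  | i :: rest, months =>
    match (PySem.Dict.mk i).get? "month" with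
    | some m => altMonthsLoop rest (if months.contains m then months else months ++ [m])
    | none => none

-- sum(i['sales'] for i in list_dist if i['month'] == m)
def altSum : List (List (String × Int)) → Int → Option Int
  | [], _ => some 0
  | i :: rest, m =>
    match (PySem.Dict.mk i).get? "month" with
    | some mo =>
        if mo == m then
          match (PySem.Dict.mk i).get? "sales" with
          | some s => (altSum rest m).map (fun t => s + t)
          | none => none
        else altSum rest m
    | none => none

-- {m: sum(...) for m in months}
def func_alt (list_dist : List (List (String × Int))) : List (Int × Int) :=
  (((altMonthsLoop list_dist []).getD []).mapM
      (fun m => (altSum list_dist m).map (fun s => (m, s)))).getD []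

-- ===== PRECONDITION & SPEC =====
-- Pre_ excludes exactly the inputs where A raises KeyError: a record missing the 'month' or 'sales' key.
def Pre_func (list_dist : List (List (String × Int))) : Prop :=
  ∀ i ∈ list_dist, ((PySem.Dict.mk i).get? "month").isSome ∧ ((PySem.Dict.mk i).get? "sales").isSome
instance (list_dist : List (List (String × Int))) : Decidable (Pre_func list_dist) := by
  unfold Pre_func; infer_instance
def pvWitness_func : (List (List (String × Int))) :=
  [[("month", 1), ("sales", 5)], [("month", 2), ("sales", 3)], [("month", 1), ("sales", -4)]]

def Spec_func (list_dist : List (List (String × Int))) (out : List (Int × Int)) : Prop := out = func_alt list_dist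
instance (list_dist : List (List (String × Int))) (out : List (Int × Int)) : Decidable (Spec_func list_dist out) := by unfold Spec_func; infer_instance

-- ===== CLAIM (what is proved, stated in full; the proofs are below) =====
def Claim_equal_func : Prop := ∀ (list_dist : List (List (String × Int))), Dom_func list_dist → Pre_func list_dist → Spec_func list_dist (func list_dist)

-- ===== LEMMAS AND PROOFS =====

-- proof-only pure abstractions over the extracted (month, sales) pairs
def extractP (i : List (String × Int)) : Option (Int × Int) :=
  match (PySem.Dict.mk i).get? "month", (PySem.Dict.mk i).get? "sales" with
  | some m, some s => some (m, s)
  | _, _ => none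

def loopP : List (Int × Int) → PySem.Dict Int Int → PySem.Dict Int Int
  | [], d => d
  | (m, s) :: t, d => loopP t (d.insert m (if d.contains m then d.getD m 0 + s else s))

def monthsP : List (Int × Int) → List Int → List Int
  | [], acc => acc
  | (m, _) :: t, acc => monthsP t (if acc.contains m then acc else acc ++ [m])

def sumP : List (Int × Int) → Int → Int
  | [], _ => 0
  | (mo, s) :: t, m => if mo = m then s + sumP t m else sumP t m

lemma pre_mapM (l : List (List (String × Int))) (hp : Pre_func l) :
    ∃ ps, l.mapM extractP = some ps := by
  induction l with
  | nil => exact ⟨[], rfl⟩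
  | cons i t ih =>
    obtain ⟨hm, hs⟩ := hp i List.mem_cons_self
    obtain ⟨m, hmeq⟩ := Option.isSome_iff_exists.mp hm
    obtain ⟨s, hseq⟩ := Option.isSome_iff_exists.mp hs
    obtain ⟨ps, hps⟩ := ih (fun j hj => hp j (List.mem_cons_of_mem _ hj))
    exact ⟨(m, s) :: ps, by simp [List.mapM_cons, extractP, hmeq, hseq, hps]⟩

lemma funcLoop_eq (l : List (List (String × Int))) :
    ∀ ps d, l.mapM extractP = some ps → funcLoop l d = some (loopP ps d) := by
  induction l with
  | nil => intro ps d h; simp at h; subst h; rfl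
  | cons i t ih =>
    intro ps d h
    rcases hm : (PySem.Dict.mk i).get? "month" with _ | m <;>
      rcases hs : (PySem.Dict.mk i).get? "sales" with _ | s <;>
        rcases ht : t.mapM extractP with _ | ps' <;>
          simp [List.mapM_cons, extractP, hm, hs, ht] at h
    subst h
    simp only [funcLoop, hm, hs, loopP]
    rw [ih ps' _ ht]
    congr 1
    split <;> rename_i hc <;> rfl

lemma altMonths_eq (l : List (List (String × Int))) :
    ∀ ps acc, l.mapM extractP = some ps → altMonthsLoop l acc = some (monthsP ps acc) := by
  induction l with
  | nil => intro ps acc h; simp at h; subst h; rfl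
  | cons i t ih =>
    intro ps acc h
    rcases hm : (PySem.Dict.mk i).get? "month" with _ | m <;>
      rcases hs : (PySem.Dict.mk i).get? "sales" with _ | s <;>
        rcases ht : t.mapM extractP with _ | ps' <;>
          simp [List.mapM_cons, extractP, hm, hs, ht] at h
    subst h
    simp only [altMonthsLoop, hm, monthsP]
    exact ih ps' _ ht

lemma altSum_eq (l : List (List (String × Int))) :
    ∀ ps m, l.mapM extractP = some ps → altSum l m = some (sumP ps m) := by
  induction l with
  | nil => intro ps m h; simp at h; subst h; rfl
  | cons i t ih =>
    intro ps m h
    rcases hm : (PySem.Dict.mk i).get? "month" with _ | mo <;>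
      rcases hs : (PySem.Dict.mk i).get? "sales" with _ | s <;>
        rcases ht : t.mapM extractP with _ | ps' <;>
          simp [List.mapM_cons, extractP, hm, hs, ht] at h
    subst h
    simp only [altSum, hm, hs, sumP, beq_iff_eq]
    split <;> simp [ih ps' m ht]

lemma dict_contains_keys (d : PySem.Dict Int Int) (m : Int) :
    d.keys.contains m = d.contains m := by
  rw [PySem.Dict.contains_eq_decide_mem_keys]
  simp

-- main invariant: A's loop result, as items, is B's month list mapped through B's per-month sums
lemma loopP_items (ps : List (Int × Int)) :
    ∀ d : PySem.Dict Int Int, d.keys.Nodup →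
      (loopP ps d).items = (monthsP ps d.keys).map (fun m => (m, d.getD m 0 + sumP ps m)) := by
  induction ps with
  | nil =>
    intro d hnd
    simp only [loopP, monthsP, sumP]
    rw [PySem.Dict.items_eq_map_keys d hnd 0]
    simp
  | cons p t ih =>
    obtain ⟨m, s⟩ := p
    intro d hnd
    simp only [loopP]
    set v : Int := if d.contains m then d.getD m 0 + s else s with hv
    have hnd' : (d.insert m v).keys.Nodup := PySem.Dict.nodup_keys_insert d m v hnd
    rw [ih (d.insert m v) hnd']
    have hkeys : (d.insert m v).keys = if d.keys.contains m then d.keys else d.keys ++ [m] := by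
      rw [dict_contains_keys]
      by_cases hc : d.contains m = true
      · rw [if_pos hc, PySem.Dict.keys_insert_of_contains d v hc]
      · rw [if_neg hc, PySem.Dict.keys_insert_of_not_contains d v (by simpa using hc)]
    have hfun : ∀ x, (d.insert m v).getD x 0 + sumP t x = d.getD x 0 + sumP ((m, s) :: t) x := by
      intro x
      rw [PySem.Dict.getD_insert]
      simp only [sumP]
      by_cases hx : x = m
      · subst hx
        rw [if_pos rfl, if_pos rfl, hv]
        by_cases hc : d.contains x = true
        · rw [if_pos hc]; ring
        · have h0 : d.getD x 0 = (0 : Int) :=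
            PySem.Dict.getD_of_not_contains _ _ (by simpa using hc)
          rw [if_neg hc, h0]; ring
      · rw [if_neg hx, if_neg (fun h => hx h.symm)]
    simp only [monthsP, hkeys]
    exact List.map_congr_left (fun x _ => by rw [hfun])

lemma mapM_some {α β : Type} (l : List α) (f : α → β) :
    l.mapM (fun a => some (f a)) = some (l.map f) := by
  induction l with
  | nil => rfl
  | cons a t ih => simp [List.mapM_cons, ih]

-- ===== VERDICT (by name: the statement is the Claim_ definition above) =====
theorem func_spec : Claim_equal_func := by
  intro list_dist _ hpre
  obtain ⟨ps, hps⟩ := pre_mapM list_dist hpre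
  unfold Spec_func func func_alt
  rw [funcLoop_eq list_dist ps PySem.Dict.empty hps,
      altMonths_eq list_dist ps [] hps]
  simp only [Option.getD_some]
  have hsum : (fun m => (altSum list_dist m).map (fun s => (m, s)))
      = fun m => some (m, sumP ps m) := by
    funext m; rw [altSum_eq list_dist ps m hps]; rfl
  rw [hsum, mapM_some, Option.getD_some,
      loopP_items ps PySem.Dict.empty PySem.Dict.nodup_keys_empty]
  have : (PySem.Dict.empty : PySem.Dict Int Int).keys = [] := rfl
  rw [this]
  exact List.map_congr_left (fun x _ => by
    rw [PySem.Dict.getD_empty, zero_add])
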